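-- pv_equiv track=rewrite | github.com/RobinLenin/siaa | app/core/utils/general.py | dividir_nombres_o_apellidos
-- ===== SOURCE A (Python) =====
-- def dividir_nombres_o_apellidos(nombres=None):
--     """
--     Divide el texto, en un arreglo de 2 nombres o 2 apellidos
--     :param nombres: 'primer_nombre segundo_nombre o primer_apellido segundo_apellido'
--     :return: [primer_nombre,segundo_nombre] o [primer_apellido, segundo_apellido]
--     """
--     concatenadores = ["de", "del", "la", "las", "los", "san", "mac", "mc", "van", "von", "y", "i"]
--     compuesto = ''
--     nueva_cadena = ''
--
--     for i in nombres.split(' '):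
--         if i.lower() in concatenadores:
--             compuesto = compuesto + i + ' '
--         else:
--             if nueva_cadena == '':
--                 nueva_cadena = compuesto + i
--             else:
--                 nueva_cadena = nueva_cadena + '|' + compuesto + i
--             compuesto = ''
--     nueva_cadena = nueva_cadena.split('|')
--
--     if len(nueva_cadena) >= 1:
--         primer_nombre = nueva_cadena[0]
--         segundo_nombre = nombres.replace(primer_nombre, '').strip()
--     else:
--         primer_nombre = nombres[0]
--         segundo_nombre = nombres[1]
--
--     return [primer_nombre, segundo_nombre]
-- ===== SOURCE B (Python) =====
-- def dividir_nombres_o_apellidos(nombres=None):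
--     """Same split, computed directly: only the first '|'-group of the original
--     ever matters, so scan tokens once and stop at the first real name token
--     (skipping empty tokens while nothing has been accumulated)."""
--     concatenadores = ["de", "del", "la", "las", "los", "san", "mac", "mc", "van", "von", "y", "i"]
--     prefijo = ''
--     primer_nombre = ''
--     for t in nombres.split(' '):
--         if t.lower() in concatenadores:
--             prefijo = prefijo + t + ' '
--         elif t or prefijo:
--             primer_nombre = prefijo + t
--             break
--     segundo_nombre = nombres.replace(primer_nombre, '').strip()
--     return [primer_nombre, segundo_nombre]
-- ===== Notes on version B (the rewrite author's own statement) =====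
-- stated objective: simpler
-- what changed: Only the first '|'-separated group of A's joined string is ever used, so B computes primer_nombre by a single early-exit scan over the tokens and never builds, joins or re-splits the '|'-string.
-- outside the precondition, e.g. on dividir_nombres_o_apellidos('a|b c'): A returns ['a', '|b c'], B returns ['a|b', 'c']; on dividir_nombres_o_apellidos('|'): A returns ['', '|'], B returns ['|', '']
import Mathlib
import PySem

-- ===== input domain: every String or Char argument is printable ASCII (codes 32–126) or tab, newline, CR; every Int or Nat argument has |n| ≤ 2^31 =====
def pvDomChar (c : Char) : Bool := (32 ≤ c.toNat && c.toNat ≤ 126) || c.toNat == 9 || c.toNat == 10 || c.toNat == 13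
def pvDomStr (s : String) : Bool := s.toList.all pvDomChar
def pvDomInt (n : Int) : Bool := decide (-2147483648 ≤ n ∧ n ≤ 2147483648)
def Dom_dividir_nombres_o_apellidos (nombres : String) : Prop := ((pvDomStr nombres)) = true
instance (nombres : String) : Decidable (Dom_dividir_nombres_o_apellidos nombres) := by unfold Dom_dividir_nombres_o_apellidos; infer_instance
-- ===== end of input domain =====

-- B computes primer_nombre by one early-exit scan over the tokens instead of building,
-- '|'-joining and re-splitting the grouped string; objective: simpler.


-- ===== PORT A =====
def pvConcatenadores : List String :=
  ["de", "del", "la", "las", "los", "san", "mac", "mc", "van", "von", "y", "i"]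

-- one iteration of A's for-loop: state = (compuesto, nueva_cadena)
def pvStepA (st : String × String) (i : String) : String × String :=
  if pvConcatenadores.contains (PySem.Str.lower i) then (st.1 ++ i ++ " ", st.2)
  else ("", if st.2 = "" then st.1 ++ i else st.2 ++ "|" ++ st.1 ++ i)

def dividir_nombres_o_apellidos (nombres : String) : List String :=
  -- split(' ') with a non-empty separator is always `some`
  let st := ((PySem.Str.split? nombres " ").getD []).foldl pvStepA ("", "")
  let nueva_cadena := (PySem.Str.split? st.2 "|").getD []
  if nueva_cadena.length ≥ 1 then
    -- the guard guarantees index 0 is in range, so the getD default never fires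
    let primer_nombre := (PySem.List.pyGet? nueva_cadena 0).getD ""
    let segundo_nombre := PySem.Str.strip (PySem.Str.replace nombres primer_nombre "")
    [primer_nombre, segundo_nombre]
  else
    -- unreachable (split always returns ≥ 1 pieces); Python would index nombres[0], nombres[1]
    [((PySem.Str.pyGet? nombres 0).map (String.ofList [·])).getD "",
     ((PySem.Str.pyGet? nombres 1).map (String.ofList [·])).getD ""]

-- ===== PORT B =====
-- B's loop: accumulate connector tokens into prefijo, stop at the first real token
def pvBscan (toks : List String) (prefijo : String) : String :=
  match toks with
  | [] => ""
  | t :: ts =>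
    if pvConcatenadores.contains (PySem.Str.lower t) then pvBscan ts (prefijo ++ t ++ " ")
    else if t ≠ "" ∨ prefijo ≠ "" then prefijo ++ t
    else pvBscan ts prefijo

def dividir_nombres_o_apellidos_alt (nombres : String) : List String :=
  let primer_nombre := pvBscan ((PySem.Str.split? nombres " ").getD []) ""
  let segundo_nombre := PySem.Str.strip (PySem.Str.replace nombres primer_nombre "")
  [primer_nombre, segundo_nombre]

-- ===== PRECONDITION & SPEC =====
-- Pre_ excludes strings containing '|': A uses '|' internally as its group separator, so on
-- such names its split point is an accident of the implementation; B keeps the token whole.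
def Pre_dividir_nombres_o_apellidos (nombres : String) : Prop := '|' ∉ nombres.toList
instance (nombres : String) : Decidable (Pre_dividir_nombres_o_apellidos nombres) := by unfold Pre_dividir_nombres_o_apellidos; infer_instance
def pvWitness_dividir_nombres_o_apellidos : String := "Juan de la Cruz"

def Spec_dividir_nombres_o_apellidos (nombres : String) (out : List String) : Prop := out = dividir_nombres_o_apellidos_alt nombres
instance (nombres : String) (out : List String) : Decidable (Spec_dividir_nombres_o_apellidos nombres out) := by unfold Spec_dividir_nombres_o_apellidos; infer_instance

-- ===== CLAIM (what is proved, stated in full; the proofs are below) =====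
def Claim_equal_dividir_nombres_o_apellidos : Prop := ∀ (nombres : String), Dom_dividir_nombres_o_apellidos nombres → Pre_dividir_nombres_o_apellidos nombres → Spec_dividir_nombres_o_apellidos nombres (dividir_nombres_o_apellidos nombres)

-- ===== LEMMAS AND PROOFS =====

-- structural model of Python's str.split with a single-character separator
def pvSp (c : Char) : List Char → List (List Char)
  | [] => [[]]
  | a :: r => if a = c then [] :: pvSp c r else (pvSp c r).modifyHead (a :: ·)

theorem pvSp_ne_nil (c : Char) (s : List Char) : pvSp c s ≠ [] := by
  induction s with
  | nil => simp [pvSp]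
  | cons a r ih =>
    simp only [pvSp]
    split
    · simp
    · cases hsp : pvSp c r with
      | nil => exact absurd hsp ih
      | cons g gs => simp

theorem pvSplitOn_go_eq (c : Char) (l : List Char) : ∀ (fuel : Nat) (cur : List Char) (acc : List (List Char)),
    l.length ≤ fuel →
    PySem.Chars.splitOn.go [c] fuel l cur acc
      = acc.reverse ++ (pvSp c l).modifyHead (cur.reverse ++ ·) := by
  induction l with
  | nil =>
    intro fuel cur acc _
    cases fuel <;> simp [PySem.Chars.splitOn.go, pvSp]
  | cons a r ih =>
    intro fuel cur acc hf
    cases fuel with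
    | zero => simp at hf
    | succ fuel =>
      by_cases hac : a = c
      · subst hac
        have : List.isPrefixOf [a] (a :: r) = true := by simp [List.isPrefixOf]
        simp only [PySem.Chars.splitOn.go, this, if_pos]
        rw [show List.drop (List.length [a]) (a :: r) = r by simp]
        rw [ih fuel [] (cur.reverse :: acc) (by simpa using Nat.lt_succ_iff.mp (by simpa using hf))]
        cases hsp : pvSp a r with
        | nil => exact absurd hsp (pvSp_ne_nil a r)
        | cons g gs => simp [pvSp, hsp]
      · have : List.isPrefixOf [c] (a :: r) = false := by
          simp [List.isPrefixOf]; exact fun h => hac h.symm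
        simp only [PySem.Chars.splitOn.go]
        rw [if_neg (by simp [this])]
        rw [ih fuel (a :: cur) acc (by simpa using Nat.lt_succ_iff.mp (by simpa using hf))]
        have hne := pvSp_ne_nil c r
        cases hsp : pvSp c r with
        | nil => exact absurd hsp hne
        | cons g gs => simp [pvSp, hac, hsp]
theorem pvSplitOn_eq (c : Char) (s : List Char) : PySem.Chars.splitOn s [c] = pvSp c s := by
  unfold PySem.Chars.splitOn
  rw [pvSplitOn_go_eq c s (s.length + 1) [] [] (Nat.le_succ _)]
  cases hsp : pvSp c s with
  | nil => exact absurd hsp (pvSp_ne_nil c s)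
  | cons g gs => simp

theorem pvSp_no_sep (c : Char) (s : List Char) (h : c ∉ s) : pvSp c s = [s] := by
  induction s with
  | nil => simp [pvSp]
  | cons a r ih =>
    simp only [List.mem_cons, not_or] at h
    simp [pvSp, Ne.symm h.1, ih h.2]

theorem pvSp_head_append_sep (c : Char) (a b : List Char) :
    (pvSp c (a ++ c :: b)).headD [] = (pvSp c a).headD [] := by
  induction a with
  | nil => simp [pvSp]
  | cons x a' ih =>
    by_cases hxc : x = c
    · subst hxc; simp [pvSp]
    · have h1 := pvSp_ne_nil c (a' ++ c :: b)
      have h2 := pvSp_ne_nil c a'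
      cases hs1 : pvSp c (a' ++ c :: b) with
      | nil => exact absurd hs1 h1
      | cons g gs =>
        cases hs2 : pvSp c a' with
        | nil => exact absurd hs2 h2
        | cons g' gs' =>
          have := ih
          rw [hs1, hs2] at this
          simp only [List.headD_cons] at this
          simp [pvSp, hxc, hs1, hs2, this]

theorem pvSp_mem_subset (c : Char) (s : List Char) :
    ∀ p ∈ pvSp c s, ∀ x ∈ p, x ∈ s := by
  induction s with
  | nil =>
    intro p hp x hx
    simp [pvSp] at hp
    subst hp
    simp at hx
  | cons a r ih =>
    intro p hp x hx
    by_cases hac : a = c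
    · simp only [pvSp, if_pos hac, List.mem_cons] at hp
      cases hp with
      | inl h1 => subst h1; simp at hx
      | inr h1 => exact List.mem_cons_of_mem _ (ih p h1 x hx)
    · simp only [pvSp, if_neg hac] at hp
      cases hsp : pvSp c r with
      | nil => exact absurd hsp (pvSp_ne_nil c r)
      | cons g gs =>
        rw [hsp] at hp
        simp only [List.modifyHead_cons, List.mem_cons] at hp
        cases hp with
        | inl h1 =>
          subst h1
          cases List.mem_cons.mp hx with
          | inl h2 => simp [h2]
          | inr h2 => exact List.mem_cons_of_mem _ (ih g (by simp [hsp]) x h2)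
        | inr h1 => exact List.mem_cons_of_mem _ (ih p (by simp [hsp, h1]) x hx)

-- first '|'-group of a string, the quantity A's branch extracts
def pvG (n : String) : List Char := (pvSp '|' n.toList).headD []

theorem pvG_append_bar (n rest : String) :
    pvG (n ++ "|" ++ rest) = pvG n := by
  unfold pvG
  have : (n ++ "|" ++ rest).toList = n.toList ++ '|' :: rest.toList := by
    simp [String.toList_append]
  rw [this, pvSp_head_append_sep]

-- Phase 2: once nueva_cadena is non-empty its first '|'-group never changes
theorem pvToList_append (s t : String) : (s ++ t).toList = s.toList ++ t.toList := by
  simp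

theorem pvFoldA_ne (toks : List String) : ∀ (c n : String), n ≠ "" →
    pvG (toks.foldl pvStepA (c, n)).2 = pvG n := by
  induction toks with
  | nil => intro c n _; simp
  | cons t ts ih =>
    intro c n hn
    simp only [List.foldl_cons]
    by_cases hc : pvConcatenadores.contains (PySem.Str.lower t)
    · rw [show pvStepA (c, n) t = (c ++ t ++ " ", n) from by simp only [pvStepA]; rw [if_pos hc]]
      exact ih _ n hn
    · rw [show pvStepA (c, n) t = ("", n ++ "|" ++ c ++ t) from by simp only [pvStepA]; rw [if_neg hc, if_neg hn]]
      have hbar : n ++ "|" ++ c ++ t ≠ "" := by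
        intro h
        have h2 : (n ++ "|" ++ c ++ t).toList = [] := String.toList_eq_nil_iff.mpr h
        simp at h2
      calc pvG (ts.foldl pvStepA ("", n ++ "|" ++ c ++ t)).2
          = pvG (n ++ "|" ++ c ++ t) := ih _ _ hbar
        _ = pvG n := by
            rw [show n ++ "|" ++ c ++ t = n ++ "|" ++ (c ++ t) by simp [String.append_assoc],
               pvG_append_bar]

-- Phase 1: while nueva_cadena is empty, A's first group tracks B's scan
theorem pvFoldA_scan (toks : List String) : ∀ (c : String),
    (∀ t ∈ toks, '|' ∉ t.toList) → '|' ∉ c.toList →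
    pvG (toks.foldl pvStepA (c, "")).2 = (pvBscan toks c).toList := by
  induction toks with
  | nil => intro c _ _; simp [pvBscan, pvG, pvSp]
  | cons t ts ih =>
    intro c htoks hc
    have ht : '|' ∉ t.toList := htoks t (List.mem_cons_self ..)
    have hts : ∀ u ∈ ts, '|' ∉ u.toList := fun u hu => htoks u (List.mem_cons_of_mem _ hu)
    simp only [List.foldl_cons, pvBscan]
    by_cases hcn : pvConcatenadores.contains (PySem.Str.lower t)
    · rw [show pvStepA (c, "") t = (c ++ t ++ " ", "") from by simp only [pvStepA]; rw [if_pos hcn],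
         if_pos hcn]
      refine ih _ hts ?_
      rw [pvToList_append, pvToList_append]
      simp
      exact ⟨hc, ht⟩
    · rw [show pvStepA (c, "") t = ("", c ++ t) from by simp only [pvStepA]; rw [if_neg hcn]; simp,
         if_neg hcn]
      by_cases hct : t ≠ "" ∨ c ≠ ""
      · rw [if_pos hct]
        have hne : c ++ t ≠ "" := by
          intro he
          have h2 : c.toList ++ t.toList = [] := by
            rw [← pvToList_append]; exact String.toList_eq_nil_iff.mpr he
          rcases List.append_eq_nil_iff.mp h2 with ⟨h3, h4⟩
          rcases hct with h | h
          · exact h (String.toList_eq_nil_iff.mp h4)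
          · exact h (String.toList_eq_nil_iff.mp h3)
        rw [pvFoldA_ne ts "" (c ++ t) hne]
        unfold pvG
        rw [pvSp_no_sep '|' (c ++ t).toList (by
          rw [pvToList_append]; simp; exact ⟨hc, ht⟩)]
        simp
      · rw [if_neg hct]
        rw [not_or, not_ne_iff, not_ne_iff] at hct
        obtain ⟨ht0, hc0⟩ := hct
        subst ht0; subst hc0
        simpa using ih "" hts (by simp)

-- assembling the two ports
theorem pvMain (nombres : String) (hpre : '|' ∉ nombres.toList) :
    dividir_nombres_o_apellidos nombres = dividir_nombres_o_apellidos_alt nombres := by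
  have hsplit : PySem.Str.split? nombres " "
      = some ((pvSp ' ' nombres.toList).map String.ofList) := by
    simp [PySem.Str.split?, PySem.Chars.split?, pvSplitOn_eq]
  have htoksbar : ∀ t ∈ (pvSp ' ' nombres.toList).map String.ofList, '|' ∉ t.toList := by
    intro t htm
    rcases List.mem_map.mp htm with ⟨p, hp, rfl⟩
    rw [String.toList_ofList]
    intro hxb
    exact hpre (pvSp_mem_subset ' ' nombres.toList p hp '|' hxb)
  unfold dividir_nombres_o_apellidos dividir_nombres_o_apellidos_alt
  rw [hsplit]
  simp only [Option.getD_some]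
  set toks := (pvSp ' ' nombres.toList).map String.ofList with htoks
  set st := toks.foldl pvStepA ("", "") with hst
  have hG : pvG st.2 = (pvBscan toks "").toList := pvFoldA_scan toks "" htoksbar (by simp)
  have hsplit2 : PySem.Str.split? st.2 "|"
      = some ((pvSp '|' st.2.toList).map String.ofList) := by
    simp [PySem.Str.split?, PySem.Chars.split?, pvSplitOn_eq]
  rw [hsplit2]
  simp only [Option.getD_some]
  cases hg : pvSp '|' st.2.toList with
  | nil => exact absurd hg (pvSp_ne_nil _ _)
  | cons g gs =>
    have hlen : ((g :: gs).map String.ofList).length ≥ 1 := by simp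
    rw [if_pos hlen]
    have hget : (PySem.List.pyGet? ((g :: gs).map String.ofList) 0).getD ""
        = String.ofList g := by
      simp [PySem.List.pyGet?, PySem.List.pyIdx?]
    rw [hget]
    have hgG : g = pvG st.2 := by unfold pvG; rw [hg]; rfl
    have : String.ofList g = pvBscan toks "" := by
      rw [hgG, hG, String.ofList_toList]
    rw [this]

-- ===== VERDICT (by name: the statement is the Claim_ definition above) =====
theorem dividir_nombres_o_apellidos_spec : Claim_equal_dividir_nombres_o_apellidos := by
  intro nombres _ hpre
  exact pvMain nombres hpre
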